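-- pv_equiv track=rewrite | github.com/merry-hyelyn/Programmers_weekly_challenge | Week4/answer.py | solution
-- ===== SOURCE A (Python) =====
-- def make_language_preference_table(languages, preference):
--     table = {}
--     for i in range(len(languages)):
--         table[languages[i]] = preference[i]
--     return table
--
-- def solution(table, languages, preference):
--     answer = ''
--     languages_preference = make_language_preference_table(languages, preference)
--     prev_score = 0
--     for row in table:
--         score = 0
--         data = row.split(' ')
--         for k, v in languages_preference.items():
--             if k in data:
--                 grade = 6 - data.index(k)
--                 score += grade * v
--         if prev_score < score:
--             prev_score = score
--             answer = data[0]
--         if prev_score == score: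
--             answer = data[0] if answer > data[0] else answer
--     return answer
-- ===== SOURCE B (Python) =====
-- def solution(table, languages, preference):
--     pref = {}
--     for i in range(len(languages)):
--         pref[languages[i]] = preference[i]
--     best = 0
--     answer = ''
--     for row in table:
--         tokens = row.split(' ')
--         seen = set()
--         score = 0
--         for i, t in enumerate(tokens):
--             if t in pref and t not in seen:
--                 seen.add(t)
--                 score += (6 - i) * pref[t]
--         first = tokens[0]
--         if score > best:
--             best = score
--             answer = first
--         elif score == best and first < answer:
--             answer = first
--     return answer
-- ===== Notes on version B (the rewrite author's own statement) =====
-- stated objective: faster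
-- what changed: Per row, instead of iterating over every dict entry and running a membership test plus a .index scan over the tokens for each (O(|dict|*|tokens|) per row), B makes one forward enumerate pass over the tokens with a seen-set, adding (6-i)*pref[t] at each first occurrence of a token that is in the preference dict.
import Mathlib
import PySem

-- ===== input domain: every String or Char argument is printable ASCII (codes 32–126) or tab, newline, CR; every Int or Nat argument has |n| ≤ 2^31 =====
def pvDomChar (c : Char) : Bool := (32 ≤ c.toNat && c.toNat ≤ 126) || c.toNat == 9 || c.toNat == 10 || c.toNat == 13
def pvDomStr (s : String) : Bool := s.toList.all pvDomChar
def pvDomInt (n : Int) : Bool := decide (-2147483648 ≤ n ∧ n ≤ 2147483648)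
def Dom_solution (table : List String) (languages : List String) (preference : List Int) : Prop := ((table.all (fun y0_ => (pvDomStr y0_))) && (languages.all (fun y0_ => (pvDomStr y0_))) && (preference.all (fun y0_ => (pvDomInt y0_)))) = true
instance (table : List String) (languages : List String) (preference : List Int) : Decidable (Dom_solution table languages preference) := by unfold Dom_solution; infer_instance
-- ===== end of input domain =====

-- B replaces A's per-row loop over all dict entries (each doing a membership test plus a
-- .index scan over the tokens) by a single forward pass over the tokens with a seen-set;
-- objective: faster (one pass per row instead of |dict| scans per row).

-- ===== PORT A =====
-- helper: make_language_preference_table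
def makeLanguagePreferenceTable (languages : List String) (preference : List Int) : PySem.Dict String Int :=
  (PySem.List.pyRange 0 (languages.length : Int) 1).foldl
    (fun t i => t.insert (PySem.List.pyGetD languages i "") (PySem.List.pyGetD preference i 0))
    PySem.Dict.empty

-- inner 'for k, v in languages_preference.items()' loop of A
def rowScoreA (lp : PySem.Dict String Int) (data : List String) : Int :=
  lp.items.foldl
    (fun score kv =>
      if kv.1 ∈ data then
        score + ((6 : Int) - (((PySem.List.index? data kv.1).getD 0 : Nat) : Int)) * kv.2
      else score)
    0

-- one iteration of A's 'for row in table' loop; state = (answer, prev_score)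
def stepA (lp : PySem.Dict String Int) (st : String × Int) (row : String) : String × Int :=
  let data := (PySem.Str.split? row " ").getD []
  let score := rowScoreA lp data
  let st1 := if st.2 < score then (PySem.List.pyGetD data 0 "", score) else st
  if st1.2 = score then
    ((if st1.1 > PySem.List.pyGetD data 0 "" then PySem.List.pyGetD data 0 "" else st1.1), st1.2)
  else st1

def solution (table : List String) (languages : List String) (preference : List Int) : String :=
  let lp := makeLanguagePreferenceTable languages preference
  (table.foldl (stepA lp) ("", 0)).1

-- ===== PORT B =====
-- inner 'for i, t in enumerate(tokens)' loop of B, with its seen-set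
def rowScoreB (pref : PySem.Dict String Int) (tokens : List String) : Int :=
  ((PySem.List.enumerate tokens 0).foldl
    (fun (p : PySem.Set String × Int) it =>
      if pref.contains it.2 && !(PySem.Set.contains p.1 it.2) then
        (PySem.Set.add p.1 it.2, p.2 + ((6 : Int) - it.1) * pref.getD it.2 0)
      else p)
    (PySem.Set.empty, 0)).2

-- one iteration of B's 'for row in table' loop; state = (best, answer)
def stepB (pref : PySem.Dict String Int) (st : Int × String) (row : String) : Int × String :=
  let tokens := (PySem.Str.split? row " ").getD []
  let score := rowScoreB pref tokens
  let first := PySem.List.pyGetD tokens 0 ""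
  if score > st.1 then (score, first)
  else if score = st.1 ∧ first < st.2 then (st.1, first)
  else st

def solution_alt (table : List String) (languages : List String) (preference : List Int) : String :=
  let pref := (PySem.List.pyRange 0 (languages.length : Int) 1).foldl
    (fun t i => t.insert (PySem.List.pyGetD languages i "") (PySem.List.pyGetD preference i 0))
    PySem.Dict.empty
  (table.foldl (stepB pref) (0, "")).2

-- ===== PRECONDITION & SPEC =====
-- Python A (and B) raises IndexError on preference[i] when languages is longer than preference.
def Pre_solution (_table : List String) (languages : List String) (preference : List Int) : Prop :=
  languages.length ≤ preference.length
instance (table : List String) (languages : List String) (preference : List Int) : Decidable (Pre_solution table languages preference) := by unfold Pre_solution; infer_instance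

def pvWitness_solution : List String × List String × List Int :=
  (["python 3 java", "java python c"], (["python", "java"], [7, 5]))

def Spec_solution (table : List String) (languages : List String) (preference : List Int) (out : String) : Prop := out = solution_alt table languages preference
instance (table : List String) (languages : List String) (preference : List Int) (out : String) : Decidable (Spec_solution table languages preference out) := by unfold Spec_solution; infer_instance

-- ===== CLAIM (what is proved, stated in full; the proofs are below) =====
def Claim_equal_solution : Prop := ∀ (table : List String) (languages : List String) (preference : List Int), Dom_solution table languages preference → Pre_solution table languages preference → Spec_solution table languages preference (solution table languages preference)

-- ===== LEMMAS AND PROOFS =====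

-- summing 'c * value' over the single item whose key is t
theorem pv_sum_if_eq_single (c : Int) (t : String) (w : Int) :
    ∀ (l : List (String × Int)), (l.map Prod.fst).Nodup → (t, w) ∈ l →
      (l.map (fun kv => if kv.1 = t then c * kv.2 else 0)).sum = c * w := by
  intro l
  induction l with
  | nil => intro _ h; cases h
  | cons p rest ih =>
    intro hnd hm
    simp only [List.map_cons, List.sum_cons] at *
    rcases List.mem_cons.mp hm with h | h
    · subst h
      have hz : ∀ kv ∈ rest, (if (kv : String × Int).1 = t then c * kv.2 else 0) = 0 := by
        intro kv hkv
        have hne : kv.1 ≠ t := by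
          intro he
          have hmm : kv.1 ∈ List.map Prod.fst rest := List.mem_map_of_mem (f := Prod.fst) hkv
          rw [he] at hmm
          exact (List.nodup_cons.mp hnd).1 hmm
        simp [hne]
      rw [List.map_congr_left hz]
      simp
    · have hpt : p.1 ≠ t := by
        intro he
        exact (List.nodup_cons.mp hnd).1 (he ▸ List.mem_map_of_mem (f := Prod.fst) h)
      rw [if_neg hpt, ih (List.nodup_cons.mp hnd).2 h]
      ring

-- invariant of B's inner enumerate/seen-set loop, as a sum over the dict's items
theorem pv_rowScoreB_inv (d : PySem.Dict String Int) (hd : d.keys.Nodup) :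
    ∀ (data : List String) (i0 : Int) (seen : PySem.Set String) (s0 : Int),
      ((PySem.List.enumerate data i0).foldl
        (fun (p : PySem.Set String × Int) it =>
          if d.contains it.2 && !(PySem.Set.contains p.1 it.2) then
            (PySem.Set.add p.1 it.2, p.2 + ((6 : Int) - it.1) * d.getD it.2 0)
          else p)
        (seen, s0)).2
      = s0 + (d.items.map (fun kv =>
          if kv.1 ∈ data ∧ kv.1 ∉ seen then
            ((6 : Int) - (i0 + (((PySem.List.index? data kv.1).getD 0 : Nat) : Int))) * kv.2
          else 0)).sum := by
  intro data
  induction data with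
  | nil =>
    intro i0 seen s0
    simp [PySem.List.enumerate]
  | cons t rest ih =>
    intro i0 seen s0
    rw [PySem.List.enumerate_cons, List.foldl_cons]
    by_cases hc : d.contains t = true ∧ t ∉ seen
    · -- token t is scored: extract its contribution
      have hcb : (d.contains t && !(PySem.Set.contains seen t)) = true := by
        simp [hc.1, hc.2]
      simp only [hcb, if_pos]
      rw [ih (i0 + 1) (PySem.Set.add seen t) (s0 + ((6 : Int) - i0) * d.getD t 0)]
      -- pointwise: old summand = new summand + (extraction at key t)
      have hmap : d.items.map (fun kv =>
          if kv.1 ∈ t :: rest ∧ kv.1 ∉ seen then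
            ((6 : Int) - (i0 + (((PySem.List.index? (t :: rest) kv.1).getD 0 : Nat) : Int))) * kv.2
          else 0)
        = d.items.map (fun kv =>
            (if kv.1 ∈ rest ∧ kv.1 ∉ PySem.Set.add seen t then
              ((6 : Int) - ((i0 + 1) + (((PySem.List.index? rest kv.1).getD 0 : Nat) : Int))) * kv.2
            else 0)
            + (if kv.1 = t then ((6 : Int) - i0) * kv.2 else 0)) := by
        apply List.map_congr_left
        intro kv _
        obtain ⟨k1, v1⟩ := kv
        dsimp only
        by_cases hkt : k1 = t
        · subst hkt
          rw [if_pos ⟨List.mem_cons_self, hc.2⟩,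
              if_neg (by
                rw [PySem.Set.mem_add]
                intro hx
                exact hx.2 (Or.inr rfl)),
              if_pos rfl, PySem.List.index?_cons_self]
          norm_num
        · rw [if_neg hkt]
          by_cases hkr : k1 ∈ rest ∧ k1 ∉ seen
          · rw [if_pos ⟨List.mem_cons_of_mem t hkr.1, hkr.2⟩,
                if_pos ⟨hkr.1, by rw [PySem.Set.mem_add]; tauto⟩,
                PySem.List.index?_cons_of_ne rest (fun he => hkt he.symm)]
            rcases hi : PySem.List.index? rest k1 with _ | n
            · exact absurd hkr.1 ((PySem.List.index?_eq_none_iff rest k1).mp hi)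
            · simp only [Option.map_some, Option.getD_some]
              push_cast
              ring
          · rw [if_neg (by
                intro hx
                rcases List.mem_cons.mp hx.1 with h | h
                · exact hkt h
                · exact hkr ⟨h, hx.2⟩),
                if_neg (by
                  intro hx
                  rw [PySem.Set.mem_add] at hx
                  exact hkr ⟨hx.1, fun hs => hx.2 (Or.inl hs)⟩)]
            ring
      rw [hmap, PySem.List.sum_map_add_int]
      -- the extracted column sums to (6 - i0) * d.getD t 0
      have ht : t ∈ d.keys := (PySem.Dict.contains_iff_mem_keys d t).mp hc.1
      obtain ⟨kv, hkv, hfst⟩ := List.mem_map.mp ht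
      have hkv' : (t, kv.2) ∈ d.items := by
        have he : kv = (t, kv.2) := by cases kv; simp_all
        exact he ▸ hkv
      have hw : d.getD t 0 = kv.2 := PySem.Dict.getD_of_mem_items d hkv' hd 0
      rw [pv_sum_if_eq_single ((6 : Int) - i0) t kv.2 d.items hd hkv', hw]
      ring
    · -- token t is skipped
      have hcb : (d.contains t && !(PySem.Set.contains seen t)) = false := by
        by_cases h1 : d.contains t = true
        · have h2 : t ∈ seen := by
            by_contra h2; exact hc ⟨h1, h2⟩
          simp [h2]
        · simp [Bool.eq_false_iff.mpr h1]
      simp only [hcb, Bool.false_eq_true, if_false]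
      rw [ih (i0 + 1) seen s0]
      have hmap : d.items.map (fun kv =>
          if kv.1 ∈ rest ∧ kv.1 ∉ seen then
            ((6 : Int) - ((i0 + 1) + (((PySem.List.index? rest kv.1).getD 0 : Nat) : Int))) * kv.2
          else 0)
        = d.items.map (fun kv =>
            if kv.1 ∈ t :: rest ∧ kv.1 ∉ seen then
              ((6 : Int) - (i0 + (((PySem.List.index? (t :: rest) kv.1).getD 0 : Nat) : Int))) * kv.2
            else 0) := by
        apply List.map_congr_left
        intro kv hkv
        obtain ⟨k1, v1⟩ := kv
        dsimp only
        by_cases hkt : k1 = t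
        · subst hkt
          by_cases hts : k1 ∈ seen
          · rw [if_neg (by tauto), if_neg (by tauto)]
          · have h1 : d.contains k1 = true := (PySem.Dict.contains_iff_mem_keys d k1).mpr
              (List.mem_map_of_mem (f := Prod.fst) hkv)
            exact absurd ⟨h1, hts⟩ hc
        · by_cases hkr : k1 ∈ rest ∧ k1 ∉ seen
          · rw [if_pos hkr, if_pos ⟨List.mem_cons_of_mem t hkr.1, hkr.2⟩,
                PySem.List.index?_cons_of_ne rest (fun he => hkt he.symm)]
            rcases hi : PySem.List.index? rest k1 with _ | n
            · exact absurd hkr.1 ((PySem.List.index?_eq_none_iff rest k1).mp hi)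
            · simp only [Option.map_some, Option.getD_some]
              push_cast
              ring
          · rw [if_neg hkr, if_neg (by
              intro hx
              rcases List.mem_cons.mp hx.1 with h | h
              · exact hkt h
              · exact hkr ⟨h, hx.2⟩)]
      rw [hmap]

theorem pv_rowScore_eq (d : PySem.Dict String Int) (hd : d.keys.Nodup) (data : List String) :
    rowScoreA d data = rowScoreB d data := by
  unfold rowScoreA rowScoreB
  rw [pv_rowScoreB_inv d hd data 0 PySem.Set.empty 0]
  rw [PySem.List.foldl_congr_mem d.items
    (fun score kv =>
      if kv.1 ∈ data then
        score + ((6 : Int) - (((PySem.List.index? data kv.1).getD 0 : Nat) : Int)) * kv.2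
      else score)
    (fun score kv =>
      score + (if kv.1 ∈ data then
        ((6 : Int) - (((PySem.List.index? data kv.1).getD 0 : Nat) : Int)) * kv.2 else 0))
    0 (by intro acc kv _; dsimp only; split_ifs <;> ring)]
  rw [PySem.List.foldl_add d.items
    (fun kv =>
      if kv.1 ∈ data then
        ((6 : Int) - (((PySem.List.index? data kv.1).getD 0 : Nat) : Int)) * kv.2 else 0) 0]
  congr 1
  apply congrArg List.sum
  apply List.map_congr_left
  intro kv _
  by_cases hm : kv.1 ∈ data <;> simp [hm, PySem.Set.empty]

-- the two outer folds agree (answer component), for any dict with distinct keys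
theorem pv_fold_eq (d : PySem.Dict String Int) (hd : d.keys.Nodup) :
    ∀ (table : List String) (ans : String) (best : Int),
      (table.foldl (stepA d) (ans, best)).1 = (table.foldl (stepB d) (best, ans)).2 := by
  intro table
  induction table with
  | nil => intro ans best; rfl
  | cons row rest ih =>
    intro ans best
    rw [List.foldl_cons, List.foldl_cons]
    have hstep : ∃ b' a', stepA d (ans, best) row = (a', b') ∧ stepB d (best, ans) row = (b', a') := by
      simp only [stepA, stepB]
      rw [pv_rowScore_eq d hd]
      by_cases h1 : ((ans, best) : String × Int).2 < rowScoreB d ((PySem.Str.split? row " ").getD [])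
      · refine ⟨rowScoreB d ((PySem.Str.split? row " ").getD []),
          PySem.List.pyGetD ((PySem.Str.split? row " ").getD []) 0 "", ?_, ?_⟩
        · rw [if_pos h1]
          simp
        · rw [if_pos h1]
      · rw [if_neg h1, if_neg h1]
        by_cases h2 : ((ans, best) : String × Int).2 = rowScoreB d ((PySem.Str.split? row " ").getD [])
        · rw [if_pos h2]
          by_cases h3 : PySem.List.pyGetD ((PySem.Str.split? row " ").getD []) 0 "" < ans
          · exact ⟨best, PySem.List.pyGetD ((PySem.Str.split? row " ").getD []) 0 "",
              by rw [if_pos h3], by rw [if_pos ⟨h2.symm, h3⟩]⟩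
          · exact ⟨best, ans, by rw [if_neg h3], by rw [if_neg (by
              intro hx; exact h3 hx.2)]⟩
        · exact ⟨best, ans, by rw [if_neg h2], by rw [if_neg (by
            intro hx; exact h2 hx.1.symm)]⟩
    obtain ⟨b', a', hA, hB⟩ := hstep
    rw [hA, hB]
    exact ih a' b'

theorem pv_nodup_keys (languages : List String) (preference : List Int) :
    (makeLanguagePreferenceTable languages preference).keys.Nodup := by
  unfold makeLanguagePreferenceTable
  exact PySem.Dict.nodup_keys_foldl_insert_key _ _ _ _ PySem.Dict.nodup_keys_empty

-- ===== VERDICT (by name: the statement is the Claim_ definition above) =====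
theorem solution_spec : Claim_equal_solution := by
  intro table languages preference _ _
  unfold Spec_solution solution solution_alt
  exact pv_fold_eq _ (pv_nodup_keys languages preference) table "" 0
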